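-- pv_equiv track=rewrite | github.com/carnoldruban/JustDeckIt | shuffling.py | hindu_shuffle
-- ===== SOURCE A (Python) =====
-- from typing import List, Tuple, Optional, TYPE_CHECKING
--
-- def hindu_shuffle(card_list: List['Card'], packet_size_input: Optional[int] = None) -> List['Card']:
--     """
--     Performs a Hindu shuffle (also known as a strip or running cut).
--     Small packets are taken from the top of the deck and placed in reverse order,
--     simulating them being dropped on top of each other on a table.
--     The original top of the deck becomes the new bottom.
--     """
--     if not card_list:
--         return []
--
--     working_pile = list(card_list)
--     packet_size: int
--     if packet_size_input and packet_size_input > 0: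
--         packet_size = packet_size_input
--     else:
--         # Use a reasonable default packet size
--         packet_size = max(1, len(working_pile) // 7) if len(working_pile) > 7 else 1
--
--     stripped_packets: List[List['Card']] = []
--     while working_pile:
--         current_packet_size = min(packet_size, len(working_pile))
--         packet = working_pile[:current_packet_size]
--         stripped_packets.append(packet)
--         working_pile = working_pile[current_packet_size:]
--
--     final_shuffled_pile: List['Card'] = []
--     for p in reversed(stripped_packets):
--         final_shuffled_pile.extend(p)
--     return final_shuffled_pile
-- ===== SOURCE B (Python) =====
-- def hindu_shuffle(card_list, packet_size_input=None):
--     """Hindu shuffle via packet start indices: walk the starts in reverse and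
--     extend the output; no intermediate packet list or pile rebuilding."""
--     if not card_list:
--         return []
--     n = len(card_list)
--     if packet_size_input and packet_size_input > 0:
--         k = packet_size_input
--     else:
--         k = max(1, n // 7) if n > 7 else 1
--     out = []
--     for i in reversed(range(0, n, k)):
--         out.extend(card_list[i:i + k])
--     return out
-- ===== Notes on version B (the rewrite author's own statement) =====
-- stated objective: alternative
-- what changed: Instead of repeatedly slicing the working pile into a packet list and then concatenating it reversed, B computes the packet start indices directly and extends the output once per packet, walking the starts in reverse; no intermediate packet list or pile rebuilding.
import Mathlib
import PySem

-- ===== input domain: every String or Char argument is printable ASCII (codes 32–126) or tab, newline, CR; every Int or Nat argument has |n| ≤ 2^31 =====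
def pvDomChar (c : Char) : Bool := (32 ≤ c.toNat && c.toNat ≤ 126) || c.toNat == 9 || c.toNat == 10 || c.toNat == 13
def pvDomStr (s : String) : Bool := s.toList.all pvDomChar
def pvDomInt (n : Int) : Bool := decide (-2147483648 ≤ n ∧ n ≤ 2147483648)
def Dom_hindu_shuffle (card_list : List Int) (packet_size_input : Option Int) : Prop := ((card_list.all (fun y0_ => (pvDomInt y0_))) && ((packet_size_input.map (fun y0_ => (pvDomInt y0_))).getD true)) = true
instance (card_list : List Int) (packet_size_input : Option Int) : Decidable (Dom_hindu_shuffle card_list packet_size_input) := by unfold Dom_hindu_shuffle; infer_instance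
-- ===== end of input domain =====

-- B computes the packet start indices directly and concatenates the packets in
-- reverse, instead of A's repeated re-slicing of the pile into a packet list.

-- packet-size selection: these lines are textually identical in Source A and Source B
def pickPacketSize (card_list : List Int) (packet_size_input : Option Int) : Int :=
  match packet_size_input with
  | some v => if v ≠ 0 ∧ v > 0 then v
              else if (card_list.length : Int) > 7 then
                max 1 (PySem.Int.floordiv (card_list.length : Int) 7)
              else 1
  | none => if (card_list.length : Int) > 7 then
              max 1 (PySem.Int.floordiv (card_list.length : Int) 7)
            else 1

-- ===== PORT A =====
-- A's while-loop stripping packets off the top; fuel = initial pile length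
-- (the loop shortens the pile every iteration since packet_size ≥ 1)
def stripA (fuel : Nat) (packet_size : Int) (working_pile : List Int) : List (List Int) :=
  match fuel with
  | 0 => []
  | fuel + 1 =>
    if working_pile = [] then []
    else
      let c := min packet_size (working_pile.length : Int)
      PySem.List.slice working_pile none (some c) ::
        stripA fuel packet_size (PySem.List.slice working_pile (some c) none)

def hindu_shuffle (card_list : List Int) (packet_size_input : Option Int) : List Int :=
  if card_list = [] then []
  else
    let packet_size := pickPacketSize card_list packet_size_input
    let stripped_packets := stripA card_list.length packet_size card_list
    stripped_packets.reverse.foldl (fun acc p => acc ++ p) []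

-- ===== PORT B =====
def hindu_shuffle_alt (card_list : List Int) (packet_size_input : Option Int) : List Int :=
  if card_list = [] then []
  else
    let n : Int := card_list.length
    let k := pickPacketSize card_list packet_size_input
    (PySem.List.pyRange 0 n k).reverse.foldl
      (fun out i => out ++ PySem.List.slice card_list (some i) (some (i + k))) []

-- ===== PRECONDITION & SPEC =====
def Spec_hindu_shuffle (card_list : List Int) (packet_size_input : Option Int) (out : List Int) : Prop := out = hindu_shuffle_alt card_list packet_size_input
instance (card_list : List Int) (packet_size_input : Option Int) (out : List Int) : Decidable (Spec_hindu_shuffle card_list packet_size_input out) := by unfold Spec_hindu_shuffle; infer_instance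

-- ===== CLAIM (what is proved, stated in full; the proofs are below) =====
def Claim_equal_hindu_shuffle : Prop := ∀ (card_list : List Int) (packet_size_input : Option Int), Dom_hindu_shuffle card_list packet_size_input → Spec_hindu_shuffle card_list packet_size_input (hindu_shuffle card_list packet_size_input)

-- ===== LEMMAS AND PROOFS =====

lemma default_pos (L : Nat) :
    ∃ m : Nat, 1 ≤ m ∧ (if (L : Int) > 7 then max 1 (PySem.Int.floordiv (L : Int) 7) else 1) = (m : Int) := by
  by_cases h : (L : Int) > 7
  · refine ⟨max 1 (L / 7), le_max_left _ _, ?_⟩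
    rw [if_pos h]
    have : PySem.Int.floordiv (L : Int) ((7:Nat) : Int) = ((L / 7 : Nat) : Int) := PySem.Int.floordiv_natCast L 7
    push_cast at this ⊢
    rw [this]
  · exact ⟨1, le_refl 1, by rw [if_neg h]; norm_num⟩

lemma take_min_left (l : List Int) (k : Nat) : l.take (min k l.length) = l.take k := by
  rcases le_total k l.length with h | h
  · rw [Nat.min_eq_left h]
  · rw [Nat.min_eq_right h, List.take_of_length_le h, List.take_of_length_le (le_refl _)]

lemma stripA_eq (k : Nat) (hk : 1 ≤ k) : ∀ (fuel : Nat) (l : List Int), l.length ≤ fuel →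
    stripA fuel (k : Int) l
      = (List.range ((l.length + k - 1) / k)).map (fun j => (l.drop (j * k)).take k) := by
  intro fuel
  induction fuel with
  | zero =>
    intro l hl
    have hnil : l = [] := List.eq_nil_of_length_eq_zero (by omega)
    subst hnil
    simp [stripA, Nat.div_eq_of_lt (show 0 + k - 1 < k by omega)]
    omega
  | succ fuel ih =>
    intro l hl
    by_cases hnil : l = []
    · subst hnil
      simp [stripA, Nat.div_eq_of_lt (show 0 + k - 1 < k by omega)]
      omega
    · have hn : 1 ≤ l.length := List.length_pos_of_ne_nil hnil
      have hc : min (k : Int) (l.length : Int) = ((min k l.length : Nat) : Int) := by push_cast; omega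
      simp only [stripA, if_neg hnil, hc,
        PySem.List.slice_to _ (Int.natCast_nonneg _), PySem.List.slice_from _ (Int.natCast_nonneg _),
        Int.toNat_natCast]
      have hdlen : (l.drop (min k l.length)).length = l.length - min k l.length := by simp
      rw [ih _ (by rw [hdlen]; omega), hdlen]
      by_cases hle : l.length ≤ k
      · have hmin : min k l.length = l.length := Nat.min_eq_right hle
        have hM : (l.length + k - 1) / k = 1 :=
          Nat.div_eq_of_lt_le (by omega) (by omega)
        have hm0 : (l.length - min k l.length + k - 1) / k = 0 := by
          rw [hmin]; exact Nat.div_eq_of_lt (by omega)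
        rw [hM, hm0]
        simp [take_min_left, List.drop_of_length_le hle]
      · have hmin : min k l.length = k := Nat.min_eq_left (by omega)
        have hM : (l.length + k - 1) / k = (l.length - k + k - 1) / k + 1 := by
          have h1 : l.length + k - 1 = (l.length - k + k - 1) + k := by omega
          rw [h1, Nat.add_div_right _ (by omega)]
        rw [hM, hmin, List.range_succ_eq_map, List.map_cons]
        congr 1
        · simp [take_min_left]
        · rw [List.map_map]
          apply List.map_congr_left
          intro j hj
          simp only [Function.comp]
          rw [List.drop_drop]
          have hjk : Nat.succ j * k = k + j * k := by rw [Nat.succ_mul]; omega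
          rw [hjk]

lemma pyRange_starts (n k : Nat) (hk : 1 ≤ k) :
    PySem.List.pyRange 0 (n : Int) (k : Int)
      = (List.range ((n + k - 1) / k)).map (fun j => ((j * k : Nat) : Int)) := by
  rw [PySem.List.pyRange_of_pos 0 (n : Int) (by exact_mod_cast hk)]
  have hM : (if (0:Int) < (n:Int) then ((((n:Int)) - 0 + (k:Int) - 1) / (k:Int)).toNat else 0) = (n + k - 1) / k := by
    by_cases hn : (0:Int) < (n:Int)
    · rw [if_pos hn]
      have h1 : ((n:Int)) - 0 + (k:Int) - 1 = ((n + k - 1 : Nat) : Int) := by push_cast; omega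
      rw [h1, ← Int.natCast_div, Int.toNat_natCast]
    · rw [if_neg hn]
      have : n = 0 := by omega
      subst this
      have h0 : (0 + k - 1) / k = 0 := Nat.div_eq_of_lt (by omega)
      omega
  rw [hM]
  apply List.map_congr_left
  intro j hj
  push_cast
  ring

lemma hindu_core (l : List Int) (k : Nat) (hk : 1 ≤ k) :
    (stripA l.length (k : Int) l).reverse.foldl (fun acc p => acc ++ p) []
      = (PySem.List.pyRange 0 (l.length : Int) (k : Int)).reverse.foldl
          (fun out i => out ++ PySem.List.slice l (some i) (some (i + (k : Int)))) [] := by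
  rw [stripA_eq k hk l.length l (le_refl _), pyRange_starts l.length k hk]
  rw [PySem.List.foldl_append_eq_flatMap (fun p => p),
      PySem.List.foldl_append_eq_flatMap (fun i => PySem.List.slice l (some i) (some (i + (k : Int))))]
  simp only [List.nil_append, ← List.map_reverse, List.flatMap_map]
  apply List.flatMap_congr
  intro j hj
  exact (PySem.List.slice_natCast_add l (j * k) k).symm

-- the selected packet size is always a positive natural number
lemma pickPacketSize_pos (l : List Int) (psi : Option Int) :
    ∃ m : Nat, 1 ≤ m ∧ pickPacketSize l psi = (m : Int) := by
  cases psi with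
  | none => exact default_pos l.length
  | some v =>
    simp only [pickPacketSize]
    by_cases h : v ≠ 0 ∧ v > 0
    · refine ⟨v.toNat, by omega, ?_⟩
      rw [if_pos h]
      omega
    · rw [if_neg h]
      exact default_pos l.length

-- ===== VERDICT (by name: the statement is the Claim_ definition above) =====
theorem hindu_shuffle_spec : Claim_equal_hindu_shuffle := by
  intro card_list psi _
  unfold Spec_hindu_shuffle hindu_shuffle hindu_shuffle_alt
  by_cases hc : card_list = []
  · simp [hc]
  · simp only [if_neg hc]
    obtain ⟨m, hm1, hmeq⟩ := pickPacketSize_pos card_list psi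
    rw [hmeq]
    exact hindu_core card_list m hm1
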